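-- pv_equiv track=rewrite | github.com/benry1/RecordDigitizer | guess_songsplits.py | stitch_silences
-- ===== SOURCE A (Python) =====
-- def stitch_silences(silences, pop_width=100):
--     i = 0
--     while i < len(silences) - 1:
--         if silences[i][1] + pop_width > silences[i + 1][0]:
--             silences[i][1] = silences[i + 1][1]
--             silences.pop(i + 1)
--         else:
--             i += 1
--     return silences
-- ===== SOURCE B (Python) =====
-- def stitch_silences(silences, pop_width=100):
--     out = []
--     cur = None
--     for s in silences:
--         if cur is None:
--             cur = s
--         elif cur[1] + pop_width > s[0]:
--             cur[1] = s[1]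
--         else:
--             out.append(cur)
--             cur = s
--     if cur is not None:
--         out.append(cur)
--     return out
-- ===== Notes on version B (the rewrite author's own statement) =====
-- stated objective: faster
-- what changed: Replaced the quadratic while-loop with in-place list.pop(i+1) by a single forward pass that keeps a current interval and appends it to the output when the next interval is too far away, so no element is ever removed or re-scanned.
-- outside the precondition, e.g. on stitch_silences([[1, 2], [9]], 0): A returns [[1, 2], [9]], B returns [[1, 2], [9]]
import Mathlib
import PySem

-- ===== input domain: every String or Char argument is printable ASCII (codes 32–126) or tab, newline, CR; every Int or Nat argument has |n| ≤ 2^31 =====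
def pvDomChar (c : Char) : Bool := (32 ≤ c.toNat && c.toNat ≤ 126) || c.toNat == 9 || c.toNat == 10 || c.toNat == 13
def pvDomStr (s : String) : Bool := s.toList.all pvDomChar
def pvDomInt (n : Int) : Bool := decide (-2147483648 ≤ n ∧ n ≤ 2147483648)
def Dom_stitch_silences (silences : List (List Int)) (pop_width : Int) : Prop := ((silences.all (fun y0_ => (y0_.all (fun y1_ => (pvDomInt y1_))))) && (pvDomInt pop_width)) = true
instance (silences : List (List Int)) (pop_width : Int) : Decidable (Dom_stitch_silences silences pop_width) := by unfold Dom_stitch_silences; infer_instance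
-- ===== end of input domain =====

-- B: single forward pass with a running "current" interval instead of A's quadratic
-- while-loop that pops merged intervals in place (A mutates its argument; the
-- equivalence proved here is about the RETURN value only).


-- ===== PORT A =====
-- A's while-loop over index i; silences[i][1] etc. are ported with pyGetD (exact
-- under Pre_, which guarantees the indexed accesses are in range), pop(i+1) is
-- eraseIdx, the assignment silences[i][1] = … is List.set.
def stitchALoop (silences : List (List Int)) (i : Nat) (pop_width : Int) : List (List Int) :=
  if h : i + 1 < silences.length then
    let cur := silences.getD i []
    let nxt := silences.getD (i + 1) []
    if PySem.List.pyGetD cur 1 0 + pop_width > PySem.List.pyGetD nxt 0 0 then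
      stitchALoop ((silences.set i (cur.set 1 (PySem.List.pyGetD nxt 1 0))).eraseIdx (i + 1)) i pop_width
    else
      stitchALoop silences (i + 1) pop_width
  else silences
termination_by silences.length - i
decreasing_by
  · simp only [List.length_eraseIdx, List.length_set, if_pos h]
    omega
  · omega

def stitch_silences (silences : List (List Int)) (pop_width : Int) : List (List Int) :=
  stitchALoop silences 0 pop_width

-- ===== PORT B =====
-- Source B's loop: `cur` is the running interval, `acc` the finished output list.
def stitchBLoop (pop_width : Int) (acc : List (List Int)) (cur : List Int) (rest : List (List Int)) : List (List Int) :=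
  match rest with
  | [] => acc ++ [cur]
  | s :: rest' =>
    if PySem.List.pyGetD cur 1 0 + pop_width > PySem.List.pyGetD s 0 0 then
      stitchBLoop pop_width acc (cur.set 1 (PySem.List.pyGetD s 1 0)) rest'
    else
      stitchBLoop pop_width (acc ++ [cur]) s rest'

def stitch_silences_alt (silences : List (List Int)) (pop_width : Int) : List (List Int) :=
  match silences with
  | [] => []
  | s :: rest => stitchBLoop pop_width [] s rest

-- ===== PRECONDITION & SPEC =====
-- Pre_ excludes inputs containing an inner list with fewer than 2 elements (when
-- there is more than one interval): there Python A can raise IndexError, and on the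
-- accidental sub-cases where the short list is never indexed A happens to return.
def Pre_stitch_silences (silences : List (List Int)) (pop_width : Int) : Prop :=
  silences.length ≤ 1 ∨ ∀ l ∈ silences, 2 ≤ l.length

instance (silences : List (List Int)) (pop_width : Int) : Decidable (Pre_stitch_silences silences pop_width) := by unfold Pre_stitch_silences; infer_instance

def pvWitness_stitch_silences : List (List Int) × Int := ([[0, 5], [7, 9], [30, 40]], 10)

def Spec_stitch_silences (silences : List (List Int)) (pop_width : Int) (out : List (List Int)) : Prop := out = stitch_silences_alt silences pop_width
instance (silences : List (List Int)) (pop_width : Int) (out : List (List Int)) : Decidable (Spec_stitch_silences silences pop_width out) := by unfold Spec_stitch_silences; infer_instance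

-- ===== CLAIM (what is proved, stated in full; the proofs are below) =====
def Claim_equal_stitch_silences : Prop := ∀ (silences : List (List Int)) (pop_width : Int), Dom_stitch_silences silences pop_width → Pre_stitch_silences silences pop_width → Spec_stitch_silences silences pop_width (stitch_silences silences pop_width)

-- ===== LEMMAS AND PROOFS =====

-- shifting the accumulator out of stitchBLoop
theorem stitchBLoop_acc (pop_width : Int) (a b : List (List Int)) (cur : List Int) (rest : List (List Int)) :
    stitchBLoop pop_width (a ++ b) cur rest = a ++ stitchBLoop pop_width b cur rest := by
  induction rest generalizing b cur with
  | nil => simp [stitchBLoop]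
  | cons s rest' ih =>
    simp only [stitchBLoop]
    split
    · exact ih _ _
    · rw [List.append_assoc]; exact ih _ _

-- the B-side processing of the suffix starting at `cur`
def procB (pop_width : Int) (l : List (List Int)) : List (List Int) :=
  match l with
  | [] => []
  | c :: r => stitchBLoop pop_width [] c r

-- splicing a set-then-pop step at position |T|
theorem eraseSet_key (T : List (List Int)) (cur nxt c' : List Int) (R : List (List Int)) :
    ((T ++ cur :: nxt :: R).set T.length c').eraseIdx (T.length + 1) = T ++ c' :: R := by
  induction T with
  | nil => simp
  | cons t ts ih => simpa using ih

-- A's loop keeps the first i elements untouched and processes the rest like B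
theorem stitchALoop_eq (silences : List (List Int)) (i : Nat) (pop_width : Int) :
    stitchALoop silences i pop_width = silences.take i ++ procB pop_width (silences.drop i) := by
  fun_induction stitchALoop silences i pop_width with
  | case1 silences i h cur nxt hc ih =>
    rw [ih]
    have hi : i < silences.length := Nat.lt_of_succ_lt h
    have hcur : cur = silences[i] := by
      show silences.getD i [] = _
      rw [List.getD_eq_getElem silences [] hi]
    have hnxt : nxt = silences[i + 1] := by
      show silences.getD (i + 1) [] = _
      rw [List.getD_eq_getElem silences [] h]
    have hdrop : silences.drop i = cur :: nxt :: silences.drop (i + 2) := by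
      rw [List.drop_eq_getElem_cons hi, List.drop_eq_getElem_cons h, hcur, hnxt]
    obtain ⟨T, hT⟩ : ∃ T, silences.take i = T := ⟨_, rfl⟩
    obtain ⟨R, hR⟩ : ∃ R, silences.drop (i + 2) = R := ⟨_, rfl⟩
    obtain ⟨c', hc'⟩ : ∃ c', cur.set 1 (PySem.List.pyGetD nxt 1 0) = c' := ⟨_, rfl⟩
    have hTl : T.length = i := by rw [← hT]; simp [le_of_lt hi]
    have hsplit : silences = T ++ cur :: nxt :: R := by
      conv_lhs => rw [← List.take_append_drop i silences]
      rw [hdrop, hT, hR]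
    have hset : (silences.set i c').eraseIdx (i + 1) = T ++ c' :: R := by
      have hk := eraseSet_key T cur nxt c' R
      rw [hTl, ← hsplit] at hk
      exact hk
    rw [hc', hset, hT, hdrop, hR]
    rw [show (T ++ c' :: R).take i = T by rw [← hTl]; simp]
    rw [show (T ++ c' :: R).drop i = c' :: R by rw [← hTl]; simp]
    simp only [procB, stitchBLoop, if_pos hc, hc']
  | case2 silences i h cur nxt hc ih =>
    rw [ih]
    have hi : i < silences.length := Nat.lt_of_succ_lt h
    have hcur : cur = silences[i] := by
      show silences.getD i [] = _
      rw [List.getD_eq_getElem silences [] hi]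
    have hnxt : nxt = silences[i + 1] := by
      show silences.getD (i + 1) [] = _
      rw [List.getD_eq_getElem silences [] h]
    have hdrop : silences.drop i = cur :: nxt :: silences.drop (i + 2) := by
      rw [List.drop_eq_getElem_cons hi, List.drop_eq_getElem_cons h, hcur, hnxt]
    have hdrop1 : silences.drop (i + 1) = nxt :: silences.drop (i + 2) := by
      rw [List.drop_eq_getElem_cons h, hnxt]
    have htake : silences.take (i + 1) = silences.take i ++ [cur] := by
      rw [List.take_add_one, List.getElem?_eq_getElem hi, hcur]
      rfl
    rw [htake, hdrop1, hdrop]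
    simp only [procB, stitchBLoop, if_neg hc, List.append_assoc]
    congr 1
    have := stitchBLoop_acc pop_width [cur] [] nxt (silences.drop (i + 2))
    simpa using this.symm
  | case3 silences i h =>
    rcases Nat.lt_or_ge i silences.length with hi | hi
    · have hdrop : silences.drop i = [silences[i]] := by
        rw [List.drop_eq_getElem_cons hi, List.drop_eq_nil_of_le (by omega)]
      rw [hdrop]
      have htake : silences.take i ++ [silences[i]] = silences.take (i + 1) := by
        rw [List.take_add_one, List.getElem?_eq_getElem hi]
        rfl
      have hp : procB pop_width [silences[i]] = [silences[i]] := rfl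
      rw [hp, htake, List.take_of_length_le (by omega)]
    · simp [List.take_of_length_le hi, List.drop_eq_nil_of_le hi, procB]

-- ===== VERDICT (by name: the statement is the Claim_ definition above) =====
theorem stitch_silences_spec : Claim_equal_stitch_silences := by
  intro silences pop_width _ _
  unfold Spec_stitch_silences stitch_silences stitch_silences_alt
  rw [stitchALoop_eq]
  cases silences <;> simp [procB]
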